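-- pv_equiv track=rewrite | github.com/MKanaar/Advent-of-code-2025 | 03/script1.py | process
-- ===== SOURCE A (Python) =====
-- def process(bank: list[int]) -> int:
--     max_joltage = -1
--
--     for i in range(len(bank)):
--         for j in range(i + 1, len(bank)):
--             joltage = bank[i] * 10 + bank[j]
--             if joltage > max_joltage:
--                 max_joltage = joltage
--
--     return max_joltage
-- ===== SOURCE B (Python) =====
-- def process(bank: list[int]) -> int:
--     best = -1
--     mx = None  # maximum of the elements seen so far
--     for x in bank:
--         if mx is not None:
--             cand = mx * 10 + x
--             if cand > best:
--                 best = cand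
--             if x > mx:
--                 mx = x
--         else:
--             mx = x
--     return best
-- ===== Notes on version B (the rewrite author's own statement) =====
-- stated objective: faster
-- what changed: replaced the quadratic scan over all index pairs i<j by a single pass that keeps the running maximum of the earlier elements, using that max over i<j of bank[i]*10+bank[j] equals (prefix max)*10+bank[j]
import Mathlib
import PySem

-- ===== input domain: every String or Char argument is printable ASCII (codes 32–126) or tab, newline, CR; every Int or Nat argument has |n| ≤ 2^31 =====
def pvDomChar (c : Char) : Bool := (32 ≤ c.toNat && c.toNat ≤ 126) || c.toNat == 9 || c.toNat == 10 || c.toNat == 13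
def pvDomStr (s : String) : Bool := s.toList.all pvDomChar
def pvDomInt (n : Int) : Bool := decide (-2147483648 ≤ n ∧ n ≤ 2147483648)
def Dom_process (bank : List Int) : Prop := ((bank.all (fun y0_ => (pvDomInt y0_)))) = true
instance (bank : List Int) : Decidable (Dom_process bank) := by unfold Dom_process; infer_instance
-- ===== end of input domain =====

-- B replaces A's quadratic scan over all index pairs by one pass keeping the running
-- maximum of the earlier elements (asymptotically faster).

-- ===== PORT A =====
def process (bank : List Int) : Int :=
  (PySem.List.pyRange 0 (PySem.List.len bank) 1).foldl
    (fun max_joltage i =>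
      (PySem.List.pyRange (i + 1) (PySem.List.len bank) 1).foldl
        (fun max_joltage j =>
          let joltage := PySem.List.pyGetD bank i 0 * 10 + PySem.List.pyGetD bank j 0
          if joltage > max_joltage then joltage else max_joltage)
        max_joltage)
    (-1)

-- ===== PORT B =====
def process_alt (bank : List Int) : Int :=
  (bank.foldl
    (fun (s : Int × Option Int) x =>
      match s with
      | (best, none) => (best, some x)
      | (best, some m) =>
        let cand := m * 10 + x
        let best' := if cand > best then cand else best
        (best', some (if x > m then x else m)))
    (-1, none)).1

-- ===== PRECONDITION & SPEC =====
def Spec_process (bank : List Int) (out : Int) : Prop := out = process_alt bank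
instance (bank : List Int) (out : Int) : Decidable (Spec_process bank out) := by unfold Spec_process; infer_instance

-- ===== CLAIM (what is proved, stated in full; the proofs are below) =====
def Claim_equal_process : Prop := ∀ (bank : List Int), Dom_process bank → Spec_process bank (process bank)

-- ===== LEMMAS AND PROOFS =====

-- running max of m*10+y over a list (A's inner loop; also one step of B)
def bestWith : Int → List Int → Int → Int
  | _, [], acc => acc
  | m, y :: t, acc => bestWith m t (max acc (m * 10 + y))

-- A's algorithm, recursively over the list structure
def aRec : List Int → Int → Int
  | [], acc => acc
  | x :: t, acc => aRec t (bestWith x t acc)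

-- B's algorithm after the first element: accumulator and running max
def bRec : List Int → Int → Int → Int
  | [], acc, _ => acc
  | x :: t, acc, m => bRec t (max acc (m * 10 + x)) (max m x)

theorem ite_gt_eq_max (a v : Int) : (if v > a then v else a) = max a v := by
  split_ifs <;> omega

theorem bestWith_eq_foldl (m : Int) (t : List Int) (acc : Int) :
    bestWith m t acc = t.foldl (fun a y => max a (m * 10 + y)) acc := by
  induction t generalizing acc with
  | nil => rfl
  | cons y t ih => simp only [bestWith, List.foldl_cons, ih]

theorem bestWith_max (m : Int) (t : List Int) (A c : Int) :
    bestWith m t (max A c) = max (bestWith m t A) c := by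
  induction t generalizing A with
  | nil => rfl
  | cons y t ih =>
    simp only [bestWith]
    rw [show max (max A c) (m * 10 + y) = max (max A (m * 10 + y)) c by omega, ih]

theorem bestWith_pair (t : List Int) (A m x : Int) :
    bestWith x t (bestWith m t A) = bestWith (max m x) t A := by
  induction t generalizing A with
  | nil => rfl
  | cons y t ih =>
    have h10 : max m x * 10 = max (m * 10) (x * 10) := by
      rcases le_total m x with h | h
      · rw [max_eq_right h, max_eq_right (by omega)]
      · rw [max_eq_left h, max_eq_left (by omega)]
    calc bestWith x (y :: t) (bestWith m (y :: t) A)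
        = max (bestWith x t (bestWith m t (max A (m * 10 + y)))) (x * 10 + y) := by
          simp only [bestWith, bestWith_max]
      _ = max (bestWith (max m x) t (max A (m * 10 + y))) (x * 10 + y) := by rw [ih]
      _ = bestWith (max m x) t (max (max A (m * 10 + y)) (x * 10 + y)) :=
          (bestWith_max (max m x) t (max A (m * 10 + y)) (x * 10 + y)).symm
      _ = bestWith (max m x) t (max A (max m x * 10 + y)) := by
          congr 1
          omega
      _ = bestWith (max m x) (y :: t) A := rfl

theorem bRec_eq_aRec (t : List Int) (acc m : Int) :
    bRec t acc m = aRec t (bestWith m t acc) := by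
  induction t generalizing acc m with
  | nil => rfl
  | cons x t ih =>
    simp only [bRec, aRec, bestWith, ih, bestWith_pair]

-- index range shifted by one
theorem pyRange_succ_map (a b : Int) :
    PySem.List.pyRange (a + 1) (b + 1) 1 = (PySem.List.pyRange a b 1).map (· + 1) := by
  by_cases h : a < b
  · have key : ∀ (k : Nat) (a : Int),
        PySem.List.pyRange (a + 1) (a + k + 1) 1
          = (PySem.List.pyRange a (a + k) 1).map (· + 1) := by
      intro k
      induction k with
      | zero =>
        intro a
        rw [PySem.List.pyRange_one_eq_nil (by omega), PySem.List.pyRange_one_eq_nil (by omega)]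
        rfl
      | succ k ih =>
        intro a
        rw [PySem.List.pyRange_one_cons (by omega), PySem.List.pyRange_one_cons (a := a) (by omega)]
        simp only [List.map_cons]
        have e1 : a + ((k + 1 : Nat) : Int) + 1 = (a + 1) + (k : Int) + 1 := by push_cast; ring
        have e2 : a + ((k + 1 : Nat) : Int) = (a + 1) + (k : Int) := by push_cast; ring
        rw [e1, e2, ih (a + 1)]
    have hb : b = a + ((b - a).toNat : Int) := by omega
    rw [hb]; exact key _ a
  · rw [PySem.List.pyRange_one_eq_nil (by omega), PySem.List.pyRange_one_eq_nil (by omega)]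
    rfl

theorem pyGetD_cons_succ (x : Int) (t : List Int) (i : Int) (hi : 0 ≤ i) (d : Int) :
    PySem.List.pyGetD (x :: t) (i + 1) d = PySem.List.pyGetD t i d := by
  obtain ⟨n, rfl⟩ := Int.eq_ofNat_of_zero_le hi
  have h1 : (n : Int) + 1 = ((n + 1 : Nat) : Int) := by push_cast; ring
  rw [h1, PySem.List.pyGetD_natCast, PySem.List.pyGetD_natCast]
  rfl

-- A's nested index loops compute aRec (max form)
theorem outer_eq_aRec (xs : List Int) (acc : Int) :
    (PySem.List.pyRange 0 (PySem.List.len xs) 1).foldl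
      (fun mj i =>
        (PySem.List.pyRange (i + 1) (PySem.List.len xs) 1).foldl
          (fun mj j => max mj (PySem.List.pyGetD xs i 0 * 10 + PySem.List.pyGetD xs j 0))
          mj)
      acc = aRec xs acc := by
  induction xs generalizing acc with
  | nil =>
    rw [show PySem.List.len ([] : List Int) = 0 from rfl,
        PySem.List.pyRange_one_eq_nil (by omega)]
    rfl
  | cons x t ih =>
    have hlen : PySem.List.len (x :: t) = PySem.List.len t + 1 := by
      simp [PySem.List.len_eq]
    have hpos : (0 : Int) < PySem.List.len (x :: t) := by
      simp [PySem.List.len_eq]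
    rw [PySem.List.pyRange_one_cons hpos, List.foldl_cons]
    -- first outer iteration (i = 0)
    have hfirst :
        (PySem.List.pyRange (0 + 1) (PySem.List.len (x :: t)) 1).foldl
          (fun mj j => max mj (PySem.List.pyGetD (x :: t) 0 0 * 10 + PySem.List.pyGetD (x :: t) j 0))
          acc = bestWith x t acc := by
      rw [PySem.List.pyGetD_zero_cons,
          PySem.List.foldl_pyRange_pyGetD (a := 0 + 1) (xs := x :: t) (d := 0)
            (f := fun a y => max a (x * 10 + y)) (init := acc) (by omega)]
      exact (bestWith_eq_foldl x t acc).symm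
    rw [hfirst]
    -- remaining outer iterations: shift indices by one
    rw [hlen, pyRange_succ_map 0 (PySem.List.len t), List.foldl_map,
        show aRec (x :: t) acc = aRec t (bestWith x t acc) from rfl,
        ← ih (bestWith x t acc)]
    refine PySem.List.foldl_congr_mem _ _ _ _ ?_
    intro a i hi
    have him := PySem.List.mem_pyRange_one.mp hi
    have hi0 : 0 ≤ i := by omega
    rw [pyGetD_cons_succ x t i hi0 0,
        pyRange_succ_map (i + 1) (PySem.List.len t), List.foldl_map]
    refine PySem.List.foldl_congr_mem _ _ _ _ ?_
    intro b j hj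
    have hjm := PySem.List.mem_pyRange_one.mp hj
    rw [pyGetD_cons_succ x t j (by omega) 0]

theorem process_eq_aRec (bank : List Int) : process bank = aRec bank (-1) := by
  unfold process
  rw [← outer_eq_aRec bank (-1)]
  refine PySem.List.foldl_congr_mem _ _ _ _ ?_
  intro a i _
  refine PySem.List.foldl_congr_mem _ _ _ _ ?_
  intro b j _
  simp only [ite_gt_eq_max]

-- B's fold (max form) computes bRec after the first element
theorem foldB_some (t : List Int) (acc m : Int) :
    (t.foldl
      (fun (s : Int × Option Int) x =>
        match s with
        | (best, none) => (best, some x)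
        | (best, some m) => (max best (m * 10 + x), some (max m x)))
      (acc, some m)).1 = bRec t acc m := by
  induction t generalizing acc m with
  | nil => rfl
  | cons x t ih => exact ih _ _

-- ===== VERDICT (by name: the statement is the Claim_ definition above) =====
theorem process_spec : Claim_equal_process := by
  intro bank _
  unfold Spec_process
  rw [process_eq_aRec]
  cases bank with
  | nil => rfl
  | cons x t =>
    show aRec (x :: t) (-1) =
      (t.foldl
        (fun (s : Int × Option Int) x =>
          match s with
          | (best, none) => (best, some x)
          | (best, some m) =>
            let cand := m * 10 + x
            let best' := if cand > best then cand else best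
            (best', some (if x > m then x else m)))
        ((-1 : Int), some x)).1
    have hcong :
        t.foldl
          (fun (s : Int × Option Int) x =>
            match s with
            | (best, none) => (best, some x)
            | (best, some m) =>
              let cand := m * 10 + x
              let best' := if cand > best then cand else best
              (best', some (if x > m then x else m)))
          ((-1 : Int), some x)
        = t.foldl
            (fun (s : Int × Option Int) x =>
              match s with
              | (best, none) => (best, some x)
              | (best, some m) => (max best (m * 10 + x), some (max m x)))
            ((-1 : Int), some x) := by
      refine PySem.List.foldl_congr_mem _ _ _ _ ?_
      intro s y _
      rcases s with ⟨b, _ | m⟩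
      · rfl
      · simp only [ite_gt_eq_max]
    rw [hcong, foldB_some, bRec_eq_aRec]
    rfl
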